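-- pv_equiv track=rewrite | github.com/Drag0nop/leetcode_solution | july_2025/July_9.py | maxFreeTime
-- ===== SOURCE A (Python) =====
-- from typing import List
--
-- def maxFreeTime(eventTime: int, k: int, startTime: List[int], endTime: List[int]) -> int:
--     n= len(startTime)
--     res = 0
--
--     pre = [endTime[0] - startTime[0]]
--     for i in range(1, n):
--         pre.append(pre[-1] + endTime[i] - startTime[i])
--
--     for i in range(k - 1, n):
--         left = endTime[i - k] if i - k >= 0 else 0
--         right = startTime[i + 1] if i + 1 < n else eventTime
--         total = pre[i] - (pre[i - k] if i - k >= 0 else 0)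
--         res = max(res, right - left - total)
--
--     return res
-- ===== SOURCE B (Python) =====
-- from typing import List
--
-- def maxFreeTime(eventTime: int, k: int, startTime: List[int], endTime: List[int]) -> int:
--     # gap representation + sliding window of k+1 gaps
--     n = len(startTime)
--     gaps = [startTime[0]]
--     for j in range(1, n):
--         gaps.append(startTime[j] - endTime[j - 1])
--     gaps.append(eventTime - endTime[n - 1])
--
--     best = 0
--     window = 0
--     for j, g in enumerate(gaps):
--         window += g
--         if j >= k + 1:
--             window -= gaps[j - k - 1]
--         if j >= k:
--             best = max(best, window)
--     return best
-- ===== Notes on version B (the rewrite author's own statement) =====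
-- stated objective: alternative
-- what changed: Replaces A's prefix-sum-of-durations array plus boundary-case arithmetic with a gaps array (n+1 inter-event gaps) and a sliding-window running sum over windows of k+1 gaps.
-- outside the precondition, e.g. on maxFreeTime(10, 0, [5, 6], [6, 7]): A returns 3, B returns 5; on maxFreeTime(10, -1, [5], [6]): A raises IndexError, B returns 0; on maxFreeTime(10, 1, [], []): A raises IndexError, B raises IndexError
import Mathlib
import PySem

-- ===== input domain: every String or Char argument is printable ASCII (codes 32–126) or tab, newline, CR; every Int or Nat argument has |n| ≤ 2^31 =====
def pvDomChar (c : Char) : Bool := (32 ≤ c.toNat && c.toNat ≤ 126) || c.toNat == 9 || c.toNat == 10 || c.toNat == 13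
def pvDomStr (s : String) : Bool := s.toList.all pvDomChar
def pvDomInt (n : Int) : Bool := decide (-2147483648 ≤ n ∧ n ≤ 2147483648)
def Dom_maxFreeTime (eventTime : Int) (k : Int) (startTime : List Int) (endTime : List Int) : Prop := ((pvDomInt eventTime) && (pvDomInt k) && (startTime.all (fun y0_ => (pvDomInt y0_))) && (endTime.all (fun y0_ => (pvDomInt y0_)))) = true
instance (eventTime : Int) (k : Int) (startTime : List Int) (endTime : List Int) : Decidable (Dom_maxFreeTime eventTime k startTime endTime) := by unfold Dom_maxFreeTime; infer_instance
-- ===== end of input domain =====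

-- B replaces A's prefix-sum-of-durations with a gaps array and a sliding-window running sum (alternative decomposition, same O(n) cost).

-- ===== PORT A =====
def maxFreeTime (eventTime : Int) (k : Int) (startTime : List Int) (endTime : List Int) : Int :=
  let n : Int := startTime.length
  let pre : List Int :=
    (PySem.List.pyRange 1 n 1).foldl
      (fun pre i =>
        pre ++ [PySem.List.pyGetD pre (-1) 0 + PySem.List.pyGetD endTime i 0 - PySem.List.pyGetD startTime i 0])
      [PySem.List.pyGetD endTime 0 0 - PySem.List.pyGetD startTime 0 0]
  (PySem.List.pyRange (k - 1) n 1).foldl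
    (fun res i =>
      let left := if i - k ≥ 0 then PySem.List.pyGetD endTime (i - k) 0 else 0
      let right := if i + 1 < n then PySem.List.pyGetD startTime (i + 1) 0 else eventTime
      let total := PySem.List.pyGetD pre i 0 - (if i - k ≥ 0 then PySem.List.pyGetD pre (i - k) 0 else 0)
      max res (right - left - total))
    0

-- ===== PORT B =====
def maxFreeTime_alt (eventTime : Int) (k : Int) (startTime : List Int) (endTime : List Int) : Int :=
  let n : Int := startTime.length
  let gaps : List Int :=
    ((PySem.List.pyRange 1 n 1).foldl
      (fun gaps j =>
        gaps ++ [PySem.List.pyGetD startTime j 0 - PySem.List.pyGetD endTime (j - 1) 0])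
      [PySem.List.pyGetD startTime 0 0])
    ++ [eventTime - PySem.List.pyGetD endTime (n - 1) 0]
  let st :=
    (PySem.List.enumerate gaps 0).foldl
      (fun (st : Int × Int) jg =>
        let window := st.2 + jg.2
        let window := if jg.1 ≥ k + 1 then window - PySem.List.pyGetD gaps (jg.1 - k - 1) 0 else window
        let best := if jg.1 ≥ k then max st.1 window else st.1
        (best, window))
      (0, 0)
  st.1

-- ===== PRECONDITION & SPEC =====
-- Pre_ excludes: empty startTime or an endTime shorter than startTime (A raises IndexError there),
-- and k ≤ 0 — not a meaningful count of events to move: there A either raises IndexError or its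
-- value comes from Python's negative-index wraparound into pre, which is accidental.
def Pre_maxFreeTime (eventTime : Int) (k : Int) (startTime : List Int) (endTime : List Int) : Prop :=
  startTime ≠ [] ∧ startTime.length ≤ endTime.length ∧ 1 ≤ k
instance (eventTime : Int) (k : Int) (startTime : List Int) (endTime : List Int) : Decidable (Pre_maxFreeTime eventTime k startTime endTime) := by unfold Pre_maxFreeTime; infer_instance

def pvWitness_maxFreeTime : Int × Int × List Int × List Int := (10, 1, [1, 3], [2, 5])

def Spec_maxFreeTime (eventTime : Int) (k : Int) (startTime : List Int) (endTime : List Int) (out : Int) : Prop := out = maxFreeTime_alt eventTime k startTime endTime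
instance (eventTime : Int) (k : Int) (startTime : List Int) (endTime : List Int) (out : Int) : Decidable (Spec_maxFreeTime eventTime k startTime endTime out) := by unfold Spec_maxFreeTime; infer_instance

-- ===== CLAIM (what is proved, stated in full; the proofs are below) =====
def Claim_equal_maxFreeTime : Prop := ∀ (eventTime : Int) (k : Int) (startTime : List Int) (endTime : List Int), Dom_maxFreeTime eventTime k startTime endTime → Pre_maxFreeTime eventTime k startTime endTime → Spec_maxFreeTime eventTime k startTime endTime (maxFreeTime eventTime k startTime endTime)

-- ===== LEMMAS AND PROOFS =====

def pvP (e s : Nat → Int) : Nat → Int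
  | 0 => 0
  | m+1 => pvP e s m + (e m - s m)
def pvQ (c : Int) (f g : Int → Int) : Nat → Int
  | 0 => c
  | t+1 => pvQ c f g t + f ((t:Int)+1) - g ((t:Int)+1)
def pvS (gp : Nat → Int) : Nat → Int
  | 0 => 0
  | m+1 => pvS gp m + gp m
def pvWin (gp : Nat → Int) (kn : Nat) : Nat → Int
  | 0 => 0
  | m+1 =>
    let w := pvWin gp kn m + gp m
    if kn + 1 ≤ m then w - gp (m - (kn+1)) else w
def pvBest (gp : Nat → Int) (kn : Nat) : Nat → Int
  | 0 => 0
  | m+1 => if kn ≤ m then max (pvBest gp kn m) (pvWin gp kn (m+1)) else pvBest gp kn m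

lemma preBuild (f g : Int → Int) (c : Int) (m : Nat) :
    (PySem.List.pyRange 1 (1 + (m:Int)) 1).foldl
      (fun pre i => pre ++ [PySem.List.pyGetD pre (-1) 0 + f i - g i]) [c]
    = (List.range (m+1)).map (pvQ c f g) := by
  induction m with
  | zero => simp [PySem.List.pyRange_one_eq_nil, List.range_one, pvQ]
  | succ m ih =>
    have hcast : (1 : Int) + ((m:Nat)+1 : Nat) = (1 + (m:Int)) + 1 := by push_cast; ring
    rw [hcast, PySem.List.pyRange_one_succ_right (by omega), List.foldl_append, ih]
    have hsplit : (List.range (m+1)).map (pvQ c f g)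
        = (List.range m).map (pvQ c f g) ++ [pvQ c f g m] := by
      rw [List.range_succ, List.map_append]; simp
    rw [List.foldl_cons, List.foldl_nil, hsplit, PySem.List.pyGetD_neg_one_append_singleton]
    rw [List.range_succ (n := m+1), List.map_append]
    rw [hsplit]
    have : (1 : Int) + (m:Int) = (m:Int) + 1 := by ring
    simp [pvQ, this, List.append_assoc]

lemma pvQ_eq_P (st et : List Int) (t : Nat) :
    pvQ (PySem.List.pyGetD et 0 0 - PySem.List.pyGetD st 0 0)
        (fun i => PySem.List.pyGetD et i 0) (fun i => PySem.List.pyGetD st i 0) t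
    = pvP (fun m => et.getD m 0) (fun m => st.getD m 0) (t+1) := by
  induction t with
  | zero => simp [pvQ, pvP, PySem.List.pyGetD_zero]
  | succ t ih =>
    have h : ((t:Int)+1) = ((t+1 : Nat) : Int) := by push_cast; ring
    simp only [pvQ, ih, h, PySem.List.pyGetD_natCast, pvP]
    ring

lemma pvWin_eq_S (gp : Nat → Int) (kn m : Nat) :
    pvWin gp kn m = pvS gp m - pvS gp (m - (kn+1)) := by
  induction m with
  | zero => simp [pvWin, pvS]
  | succ m ih =>
    by_cases h : kn + 1 ≤ m
    · have h2 : m + 1 - (kn+1) = (m - (kn+1)) + 1 := by omega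
      simp [pvWin, ih, h, h2, pvS]
      ring
    · have h2 : m + 1 - (kn+1) = 0 := by omega
      have h3 : m - (kn+1) = 0 := by omega
      simp [pvWin, ih, h, h2, h3, pvS]

lemma pvBest_eq (gp : Nat → Int) (kn m : Nat) :
    pvBest gp kn m
    = (List.range (m - kn)).foldl (fun r t => max r (pvWin gp kn (kn + t + 1))) 0 := by
  induction m with
  | zero => simp [pvBest]
  | succ m ih =>
    by_cases h : kn ≤ m
    · have h2 : m + 1 - kn = (m - kn) + 1 := by omega
      have h3 : kn + (m - kn) + 1 = m + 1 := by omega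
      rw [pvBest, if_pos h, ih, h2, List.range_succ, List.foldl_append, List.foldl_cons,
        List.foldl_nil, h3]
    · have h2 : m + 1 - kn = 0 := by omega
      have h3 : m - kn = 0 := by omega
      rw [pvBest, if_neg h, ih, h2, h3]

def pvG (E : Int) (s e : Nat → Int) (n : Nat) (j : Nat) : Int :=
  if j = 0 then s 0 else if j < n then s j - e (j-1) else E - e (n-1)

lemma pvS_of_G (E : Int) (s e : Nat → Int) (n : Nat) (hn : 1 ≤ n) (m : Nat) (hm : m ≤ n + 1) :
    pvS (pvG E s e n) m
    = if m = 0 then 0 else if m ≤ n then s (m-1) - pvP e s (m-1) else E - pvP e s n := by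
  induction m with
  | zero => simp [pvS]
  | succ m ih =>
    rw [pvS, ih (by omega)]
    by_cases h0 : m = 0
    · subst h0
      simp only [pvS, pvG, if_pos rfl, if_neg (by omega : ¬ (0:Nat)+1 = 0), if_pos hn]
      simp [pvP]
    · by_cases h1 : m < n
      · have e1 : pvG E s e n m = s m - e (m-1) := by simp [pvG, h0, h1]
        have hm1 : m - 1 + 1 = m := by omega
        simp only [if_neg h0, if_pos (by omega : m ≤ n), e1,
          if_neg (by omega : ¬ m + 1 = 0), if_pos (by omega : m + 1 ≤ n)]
        have : pvP e s m = pvP e s (m-1) + (e (m-1) - s (m-1)) := by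
          conv_lhs => rw [← hm1, pvP]
        simp only [Nat.add_sub_cancel, this]
        ring
      · -- m = n, m+1 = n+1
        have hmn : m = n := by omega
        subst hmn
        have e1 : pvG E s e m m = E - e (m-1) := by simp [pvG, h0]
        simp only [if_neg h0, if_pos (le_refl m), e1,
          if_neg (by omega : ¬ m + 1 = 0), if_neg (by omega : ¬ m + 1 ≤ m)]
        have hm1 : m - 1 + 1 = m := by omega
        have hP : pvP e s m = pvP e s (m-1) + (e (m-1) - s (m-1)) := by
          conv_lhs => rw [← hm1, pvP]
        rw [hP]; ring

def pvVal (E : Int) (kn : Nat) (s e : Nat → Int) (n j : Nat) : Int :=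
  (if j < n then s j else E) - (if kn + 1 ≤ j then e (j - (kn+1)) else 0)
    - (pvP e s j - (if kn + 1 ≤ j then pvP e s (j - kn) else 0))

lemma window_val (E : Int) (s e : Nat → Int) (n kn j : Nat) (hn : 1 ≤ n)
    (hk : kn ≤ j) (hj : j ≤ n) :
    pvS (pvG E s e n) (j+1) - pvS (pvG E s e n) ((j+1) - (kn+1)) = pvVal E kn s e n j := by
  rw [pvS_of_G E s e n hn (j+1) (by omega), pvS_of_G E s e n hn (j+1-(kn+1)) (by omega)]
  unfold pvVal
  have hsub : j + 1 - (kn+1) = j - kn := by omega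
  rw [hsub]
  by_cases hkj : kn + 1 ≤ j
  · have hne : ¬ (j - kn = 0) := by omega
    have hle : j - kn ≤ n := by omega
    simp only [if_neg (by omega : ¬ j+1 = 0), if_neg hne, if_pos hle, if_pos hkj]
    have h2 : j - kn - 1 = j - (kn+1) := by omega
    have h3 : (j - (kn+1)) + 1 = j - kn := by omega
    have hP : pvP e s (j - kn) = pvP e s (j-(kn+1)) + (e (j-(kn+1)) - s (j-(kn+1))) := by
      conv_lhs => rw [← h3, pvP]
    have h4 : j + 1 - 1 = j := by omega
    by_cases hjn : j < n
    · simp only [if_pos (by omega : j+1 ≤ n), if_pos hjn, h2, h4, hP]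
      ring
    · have hjn' : j = n := by omega
      subst hjn'
      simp only [if_neg (by omega : ¬ j+1 ≤ j), if_neg hjn, h2, hP]
      ring
  · have h0 : j - kn = 0 := by omega
    have h4 : j + 1 - 1 = j := by omega
    by_cases hjn : j < n
    · simp [h0, hkj, hjn, h4, (by omega : ¬ j+1 = 0), (by omega : j+1 ≤ n)]
      try ring
    · have hjn' : j = n := by omega
      subst hjn'
      simp [h0, hkj, hjn, (by omega : ¬ j+1 = 0), (by omega : ¬ j+1 ≤ j)]
      try ring

lemma gaps_eq (E : Int) (st et : List Int) (h1 : st ≠ []) :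
    ((PySem.List.pyRange 1 (st.length : Int) 1).foldl
      (fun gaps j =>
        gaps ++ [PySem.List.pyGetD st j 0 - PySem.List.pyGetD et (j - 1) 0])
      [PySem.List.pyGetD st 0 0])
    ++ [E - PySem.List.pyGetD et ((st.length : Int) - 1) 0]
    = (List.range (st.length + 1)).map
        (pvG E (fun t => st.getD t 0) (fun t => et.getD t 0) st.length) := by
  have hn : 1 ≤ st.length := by
    rcases st with _|⟨a,l⟩
    · exact absurd rfl h1
    · simp
  rw [PySem.List.foldl_append_singleton_eq_map, PySem.List.pyRange_one]
  have ht : ((st.length : Int) - 1).toNat = st.length - 1 := by omega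
  rw [ht]
  -- RHS decomposition
  have hr : List.range (st.length + 1) = (0 :: (List.range (st.length - 1)).map (· + 1)) ++ [st.length] := by
    rw [List.range_succ]
    congr 1
    conv_lhs => rw [show st.length = (st.length - 1) + 1 by omega, List.range_succ_eq_map]
  have hhead : PySem.List.pyGetD st 0 0
      = pvG E (fun t => st.getD t 0) (fun t => et.getD t 0) st.length 0 := by
    simp [pvG, PySem.List.pyGetD_zero]
  have hlast : E - PySem.List.pyGetD et ((st.length : Int) - 1) 0
      = pvG E (fun t => st.getD t 0) (fun t => et.getD t 0) st.length st.length := by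
    have c3 : (st.length : Int) - 1 = ((st.length - 1 : Nat) : Int) := by omega
    rw [c3, PySem.List.pyGetD_natCast]
    simp [pvG, h1]
  have hmid : (List.range (st.length - 1)).map
        (fun t : Nat => PySem.List.pyGetD st (1+(t:Int)) 0 - PySem.List.pyGetD et (1+(t:Int) - 1) 0)
      = (List.range (st.length - 1)).map
        (fun t => pvG E (fun u => st.getD u 0) (fun u => et.getD u 0) st.length (t + 1)) := by
    apply List.map_congr_left
    intro t htm
    rw [List.mem_range] at htm
    have e1 : PySem.List.pyGetD st (1+(t:Int)) 0 = st.getD (t+1) 0 := by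
      rw [show (1:Int)+(t:Int) = ((t+1:Nat):Int) by omega, PySem.List.pyGetD_natCast]
    have e2 : PySem.List.pyGetD et (1+(t:Int)-1) 0 = et.getD t 0 := by
      rw [show (1:Int)+(t:Int)-1 = ((t:Nat):Int) by omega, PySem.List.pyGetD_natCast]
    have hlt : t + 1 < st.length := by omega
    have hne : ¬ (t + 1 = 0) := by omega
    simp [pvG, e1, e2, hne, hlt]
  rw [hr]
  simp only [List.map_append, List.map_cons, List.map_map, List.map_nil,
    List.singleton_append, List.cons_append, Function.comp_def]
  rw [hmid, hhead, hlast]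
  simp
def pvRef (E : Int) (kn : Nat) (s e : Nat → Int) (n : Nat) : Int :=
  (List.range (n + 1 - kn)).foldl (fun r t => max r (pvVal E kn s e n (kn + t))) 0

lemma loopB (gp : Nat → Int) (kn m : Nat) :
    (List.range m).foldl
      (fun (st : Int × Int) (j : Nat) =>
        ((if kn ≤ j then
            max st.1 (if kn + 1 ≤ j then st.2 + gp j - gp (j - (kn+1)) else st.2 + gp j)
          else st.1),
         (if kn + 1 ≤ j then st.2 + gp j - gp (j - (kn+1)) else st.2 + gp j)))
      (0, 0)
    = (pvBest gp kn m, pvWin gp kn m) := by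
  induction m with
  | zero => simp [pvBest, pvWin]
  | succ m ih =>
    rw [List.range_succ, List.foldl_append, ih, List.foldl_cons, List.foldl_nil]
    simp only [pvBest, pvWin]

lemma A_eq (E k : Int) (st et : List Int) (h1 : st ≠ []) (h3 : 1 ≤ k) :
    maxFreeTime E k st et
    = pvRef E k.toNat (fun t => st.getD t 0) (fun t => et.getD t 0) st.length := by
  have hn : 1 ≤ st.length := by
    rcases st with _|⟨a,l⟩
    · exact absurd rfl h1
    · simp
  simp only [maxFreeTime]
  have hpre : (PySem.List.pyRange 1 (st.length : Int) 1).foldl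
      (fun pre i =>
        pre ++ [PySem.List.pyGetD pre (-1) 0 + PySem.List.pyGetD et i 0 - PySem.List.pyGetD st i 0])
      [PySem.List.pyGetD et 0 0 - PySem.List.pyGetD st 0 0]
      = (List.range st.length).map
          (fun t => pvP (fun m => et.getD m 0) (fun m => st.getD m 0) (t+1)) := by
    have hc1 : (st.length : Int) = 1 + ((st.length - 1 : Nat) : Int) := by omega
    rw [hc1, preBuild, funext (pvQ_eq_P st et),
      show st.length - 1 + 1 = st.length from by omega]
  rw [hpre, PySem.List.pyRange_one (k-1) (st.length : Int), List.foldl_map,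
    show ((st.length : Int) - (k-1)).toNat = st.length + 1 - k.toNat from by omega]
  unfold pvRef
  apply PySem.List.foldl_congr_mem
  intro acc t htm
  rw [List.mem_range] at htm
  have hkn : 1 ≤ k.toNat := by omega
  have hbound : k.toNat + t ≤ st.length := by omega
  congr 1
  unfold pvVal
  by_cases ht0 : 1 ≤ t
  · have hge : k - 1 + (t:Int) - k ≥ 0 := by omega
    rw [if_pos hge, if_pos hge]
    rw [show k - 1 + (t:Int) - k = ((t-1 : Nat) : Int) from by omega,
        show k - 1 + (t:Int) + 1 = ((k.toNat + t : Nat) : Int) from by omega,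
        show k - 1 + (t:Int) = ((k.toNat + t - 1 : Nat) : Int) from by omega]
    simp only [PySem.List.pyGetD_natCast]
    rw [PySem.List.getD_map_range _ _ _ _ (by omega : k.toNat + t - 1 < st.length),
        PySem.List.getD_map_range _ _ _ _ (by omega : t - 1 < st.length)]
    simp only [Nat.cast_lt]
    rw [show k.toNat + t - 1 + 1 = k.toNat + t from by omega,
        show t - 1 + 1 = t from by omega,
        if_pos (by omega : k.toNat + 1 ≤ k.toNat + t),
        show k.toNat + t - (k.toNat + 1) = t - 1 from by omega,
        show k.toNat + t - k.toNat = t from by omega]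
    rw [if_pos (by omega : k.toNat + 1 ≤ k.toNat + t)]
  · have ht0' : t = 0 := by omega
    subst ht0'
    simp only [Nat.cast_zero, add_zero]
    rw [if_neg (by omega : ¬ k - 1 - k ≥ 0)]
    rw [if_neg (by omega : ¬ k - 1 - k ≥ 0)]
    rw [show k - 1 + 1 = ((k.toNat : Nat) : Int) from by omega,
        show k - 1 = ((k.toNat - 1 : Nat) : Int) from by omega]
    simp only [PySem.List.pyGetD_natCast]
    rw [PySem.List.getD_map_range _ _ _ _ (by omega : k.toNat - 1 < st.length)]
    simp only [Nat.cast_lt]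
    rw [show k.toNat - 1 + 1 = k.toNat from by omega,
        if_neg (by omega : ¬ k.toNat + 1 ≤ k.toNat)]
    simp

lemma B_eq (E k : Int) (st et : List Int) (h1 : st ≠ []) (h3 : 1 ≤ k) :
    maxFreeTime_alt E k st et
    = pvRef E k.toNat (fun t => st.getD t 0) (fun t => et.getD t 0) st.length := by
  have hn : 1 ≤ st.length := by
    rcases st with _|⟨a,l⟩
    · exact absurd rfl h1
    · simp
  simp only [maxFreeTime_alt]
  rw [gaps_eq E st et h1]
  rw [PySem.List.enumerate_eq_map_pyRange _ 0]
  simp only [PySem.List.len_eq, List.length_map, List.length_range]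
  rw [PySem.List.pyRange_zero_nat, List.foldl_map, List.foldl_map]
  have hk : k = (k.toNat : Int) := by omega
  have hfold : ∀ (init : Int × Int),
      List.foldl
        (fun (x : Int × Int) (y : Nat) =>
          (fun (st2 : Int × Int) (jg : Int × Int) =>
            ((if jg.1 ≥ k then
                max st2.1 (if jg.1 ≥ k + 1 then st2.2 + jg.2 - PySem.List.pyGetD
                    (List.map (pvG E (fun t => st.getD t 0) (fun t => et.getD t 0) st.length)
                      (List.range (st.length + 1))) (jg.1 - k - 1) 0
                  else st2.2 + jg.2)
              else st2.1),
             (if jg.1 ≥ k + 1 then st2.2 + jg.2 - PySem.List.pyGetD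
                  (List.map (pvG E (fun t => st.getD t 0) (fun t => et.getD t 0) st.length)
                    (List.range (st.length + 1))) (jg.1 - k - 1) 0
              else st2.2 + jg.2))) x
            ((↑y : Int), PySem.List.pyGetD
              (List.map (pvG E (fun t => st.getD t 0) (fun t => et.getD t 0) st.length)
                (List.range (st.length + 1))) (↑y) 0))
        init (List.range (st.length + 1))
      = List.foldl
          (fun (x : Int × Int) (y : Nat) =>
            ((if k.toNat ≤ y then
                max x.1 (if k.toNat + 1 ≤ y then
                    x.2 + pvG E (fun t => st.getD t 0) (fun t => et.getD t 0) st.length y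
                      - pvG E (fun t => st.getD t 0) (fun t => et.getD t 0) st.length (y - (k.toNat+1))
                  else x.2 + pvG E (fun t => st.getD t 0) (fun t => et.getD t 0) st.length y)
              else x.1),
             (if k.toNat + 1 ≤ y then
                x.2 + pvG E (fun t => st.getD t 0) (fun t => et.getD t 0) st.length y
                  - pvG E (fun t => st.getD t 0) (fun t => et.getD t 0) st.length (y - (k.toNat+1))
              else x.2 + pvG E (fun t => st.getD t 0) (fun t => et.getD t 0) st.length y)))
          init (List.range (st.length + 1)) := by
    intro init
    apply PySem.List.foldl_congr_mem
    intro acc y hy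
    rw [List.mem_range] at hy
    simp only []
    rw [PySem.List.pyGetD_natCast,
        PySem.List.getD_map_range _ _ _ _ (by omega : y < st.length + 1)]
    have e1 : ((y:Int) ≥ k + 1) ↔ (k.toNat + 1 ≤ y) := by omega
    have e2 : ((y:Int) ≥ k) ↔ (k.toNat ≤ y) := by omega
    simp only [e1, e2]
    by_cases hc1 : k.toNat + 1 ≤ y
    · simp only [if_pos hc1]
      rw [show (y:Int) - k - 1 = ((y - (k.toNat+1) : Nat) : Int) from by omega,
          PySem.List.pyGetD_natCast,
          PySem.List.getD_map_range _ _ _ _ (by omega : y - (k.toNat+1) < st.length + 1)]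
    · simp only [if_neg hc1]
  rw [hfold, loopB]
  simp only []
  rw [pvBest_eq]
  unfold pvRef
  apply PySem.List.foldl_congr_mem
  intro acc t htm
  rw [List.mem_range] at htm
  rw [pvWin_eq_S,
      window_val E (fun t => st.getD t 0) (fun t => et.getD t 0) st.length k.toNat (k.toNat + t) hn
        (by omega) (by omega)]

-- ===== VERDICT (by name: the statement is the Claim_ definition above) =====
theorem maxFreeTime_spec : Claim_equal_maxFreeTime := by
  intro E k st et _hdom hpre
  obtain ⟨h1, _h2, h3⟩ := hpre
  unfold Spec_maxFreeTime
  rw [A_eq E k st et h1 h3, B_eq E k st et h1 h3]
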